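-- pv_equiv track=rewrite | github.com/LeetCode101/LeetCode-Python | leetcode/algorithms/p0533_lonely_pixel_ii.py | findBlackPixel
-- ===== SOURCE A (Python) =====
-- import collections
-- from typing import List
--
-- def findBlackPixel(picture: List[List[str]], target: int) -> int:
--     m, n = len(picture), len(picture[0])
--     row_to_column = collections.defaultdict(list)
--     column_to_row = collections.defaultdict(list)
--
--     for i in range(m):
--         for j in range(n):
--             if picture[i][j] == 'B':
--                 row_to_column[i].append(j)
--                 column_to_row[j].append(i)
--
--     count = 0
--
--     for i in range(m):
--         if i not in row_to_column or len(row_to_column[i]) != target: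
--             continue
--
--         for j in range(len(row_to_column[i])):
--             if len(column_to_row[row_to_column[i][j]]) != target:
--                 continue
--
--             is_valid = True
--
--             for k in range(1, target):
--                 row = column_to_row[row_to_column[i][j]]
--
--                 if picture[row[k - 1]] != picture[row[k]]:
--                     is_valid = False
--
--                     break
--             if is_valid:
--                 count += 1
--
--     return count
-- ===== SOURCE B (Python) =====
-- def findBlackPixel(picture, target):
--     n = len(picture[0])
--     total = 0
--     for j in range(n):
--         rows = [i for i in range(len(picture)) if picture[i][j] == 'B']
--         if rows and len(rows) == target \
--                 and all(picture[i] == picture[rows[0]] for i in rows) \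
--                 and picture[rows[0]][:n].count('B') == target:
--             total += target
--     return total
-- ===== Notes on version B (the rewrite author's own statement) =====
-- stated objective: simpler
-- what changed: B drops A's two defaultdicts and the per-(row,column) revalidation: it scans column-major, and for each column with exactly `target` black pixels whose rows are all identical and whose common row has exactly `target` black pixels it adds `target` once.
-- outside the precondition, e.g. on findBlackPixel([], 0): A raises IndexError, B raises IndexError; on findBlackPixel([['B', 'W'], ['B']], 1): A raises IndexError, B raises IndexError
import Mathlib
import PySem

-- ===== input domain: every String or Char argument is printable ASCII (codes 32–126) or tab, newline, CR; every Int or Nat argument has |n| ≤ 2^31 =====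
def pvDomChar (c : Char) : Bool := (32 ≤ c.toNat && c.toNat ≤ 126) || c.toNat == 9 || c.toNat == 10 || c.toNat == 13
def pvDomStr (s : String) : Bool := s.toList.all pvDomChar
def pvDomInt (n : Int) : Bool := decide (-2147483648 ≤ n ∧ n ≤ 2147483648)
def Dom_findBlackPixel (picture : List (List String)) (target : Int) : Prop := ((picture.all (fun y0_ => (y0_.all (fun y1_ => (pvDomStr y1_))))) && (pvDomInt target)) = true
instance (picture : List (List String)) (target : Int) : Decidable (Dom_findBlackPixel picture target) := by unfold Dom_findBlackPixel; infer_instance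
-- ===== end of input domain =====

-- B re-implements the count column-major: one pass over columns, adding `target` for each all-identical
-- column of exactly `target` black pixels whose common row also has exactly `target` black pixels,
-- instead of A's row dictionaries and per-(row,column) revalidation. Objective: simpler (same return value).

-- ===== PORT A =====
def findBlackPixel (picture : List (List String)) (target : Int) : Int :=
  let m : Int := picture.length
  let n : Int := ((PySem.List.pyGetD picture 0 []).length : Int)
  let dicts :=
    (PySem.List.pyRange 0 m 1).foldl (fun ds i =>
      (PySem.List.pyRange 0 n 1).foldl (fun ds j =>
        if PySem.List.pyGetD (PySem.List.pyGetD picture i []) j "" == "B" then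
          (ds.1.modify i [] (· ++ [j]), ds.2.modify j [] (· ++ [i]))
        else ds) ds)
      ((PySem.Dict.empty : PySem.Dict Int (List Int)),
       (PySem.Dict.empty : PySem.Dict Int (List Int)))
  let row_to_column := dicts.1
  let column_to_row := dicts.2
  (PySem.List.pyRange 0 m 1).foldl (fun count i =>
    if ¬ row_to_column.contains i ∨ ((row_to_column.getD i []).length : Int) ≠ target then
      count
    else
      (PySem.List.pyRange 0 ((row_to_column.getD i []).length : Int) 1).foldl (fun count j =>
        let c := PySem.List.pyGetD (row_to_column.getD i []) j 0
        if ((column_to_row.getD c []).length : Int) ≠ target then count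
        else
          let is_valid := (PySem.List.pyRange 1 target 1).foldl (fun v k =>
            if v then
              let row := column_to_row.getD c []
              if PySem.List.pyGetD picture (PySem.List.pyGetD row (k - 1) 0) []
                   ≠ PySem.List.pyGetD picture (PySem.List.pyGetD row k 0) [] then false
              else v
            else v) true
          if is_valid then count + 1 else count) count) 0

-- ===== PORT B =====
def findBlackPixel_alt (picture : List (List String)) (target : Int) : Int :=
  let n : Nat := (PySem.List.pyGetD picture 0 []).length
  (PySem.List.pyRange 0 (n : Int) 1).foldl (fun total j =>
    let rows := (PySem.List.pyRange 0 (picture.length : Int) 1).filter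
      (fun i => PySem.List.pyGetD (PySem.List.pyGetD picture i []) j "" == "B")
    if rows ≠ [] ∧ (rows.length : Int) = target
        ∧ rows.all (fun i => PySem.List.pyGetD picture i [] == PySem.List.pyGetD picture (rows.headD 0) [])
        ∧ (((PySem.List.pyGetD picture (rows.headD 0) []).take n).count "B" : Int) = target
    then total + target else total) 0

-- ===== PRECONDITION & SPEC =====
-- Pre_ excludes exactly the inputs on which the Python A raises IndexError:
-- an empty picture (A reads picture[0]) and pictures where some row is shorter
-- than the first row (A reads picture[i][j] for every j < len(picture[0])).
def Pre_findBlackPixel (picture : List (List String)) (target : Int) : Prop :=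
  picture ≠ [] ∧ ∀ r ∈ picture, (picture.headD []).length ≤ r.length
instance (picture : List (List String)) (target : Int) : Decidable (Pre_findBlackPixel picture target) := by unfold Pre_findBlackPixel; infer_instance
def pvWitness_findBlackPixel : List (List String) × Int := ([["B","W"],["W","B"]], 1)

def Spec_findBlackPixel (picture : List (List String)) (target : Int) (out : Int) : Prop := out = findBlackPixel_alt picture target
instance (picture : List (List String)) (target : Int) (out : Int) : Decidable (Spec_findBlackPixel picture target out) := by unfold Spec_findBlackPixel; infer_instance

-- ===== CLAIM (what is proved, stated in full; the proofs are below) =====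
def Claim_equal_findBlackPixel : Prop := ∀ (picture : List (List String)) (target : Int), Dom_findBlackPixel picture target → Pre_findBlackPixel picture target → Spec_findBlackPixel picture target (findBlackPixel picture target)

-- ===== LEMMAS AND PROOFS =====

-- Row i of the picture (default [] out of range), and the test picture[i][j] == 'B'.
def pvRowF (pic : List (List String)) (i : Int) : List String := PySem.List.pyGetD pic i []
def pvCellF (pic : List (List String)) (i j : Int) : Bool :=
  PySem.List.pyGetD (PySem.List.pyGetD pic i []) j "" == "B"
-- Columns j < n with picture[i][j] == 'B'  (A's row_to_column[i]).
def pvBcols (pic : List (List String)) (n : Int) (i : Int) : List Int :=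
  (PySem.List.pyRange 0 n 1).filter (fun j => pvCellF pic i j)
-- Rows i < len(pic) with picture[i][j] == 'B'  (A's column_to_row[j]).
def pvBrows (pic : List (List String)) (j : Int) : List Int :=
  (PySem.List.pyRange 0 (pic.length : Int) 1).filter (fun i => pvCellF pic i j)
-- Column validity as A checks it: exactly `t` black rows, all of them identical rows.
def pvColOK (pic : List (List String)) (t : Int) (c : Int) : Bool :=
  (((pvBrows pic c).length : Int) == t)
    && (pvBrows pic c).all (fun a => pvRowF pic a == pvRowF pic ((pvBrows pic c).headD 0))

def pvPairs (pic : List (List String)) (m n : Int) : List (Int × Int) :=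
  (PySem.List.pyRange 0 m 1).flatMap (fun i => (pvBcols pic n i).map (fun j => (i, j)))

theorem pv_row0 (pic : List (List String)) : PySem.List.pyGetD pic 0 [] = pic.headD [] := by
  cases pic <;> simp [PySem.List.pyGetD, PySem.List.pyGet?, PySem.List.pyIdx?]

-- generic fold over a flatMap
theorem pv_foldl_flatMap {α β γ : Type} (l : List α) (g : α → List β) (f : γ → β → γ) (init : γ) :
    (l.flatMap g).foldl f init = l.foldl (fun s a => (g a).foldl f s) init := by
  induction l generalizing init with
  | nil => rfl
  | cons x xs ih => simp [List.flatMap_cons, List.foldl_append, ih]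

-- the nested dict-building loop of A is the pair of grouping folds over pvPairs
theorem pv_build_eq (pic : List (List String)) (m n : Int) :
    ((PySem.List.pyRange 0 m 1).foldl (fun ds i =>
      (PySem.List.pyRange 0 n 1).foldl (fun ds j =>
        if PySem.List.pyGetD (PySem.List.pyGetD pic i []) j "" == "B" then
          (ds.1.modify i [] (· ++ [j]), ds.2.modify j [] (· ++ [i]))
        else ds) ds)
      ((PySem.Dict.empty : PySem.Dict Int (List Int)),
       (PySem.Dict.empty : PySem.Dict Int (List Int))))
    = ((pvPairs pic m n).foldl (fun d p => d.modify p.1 [] (· ++ [p.2])) PySem.Dict.empty,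
       (pvPairs pic m n).foldl (fun d p => d.modify p.2 [] (· ++ [p.1])) PySem.Dict.empty) := by
  conv_rhs => rw [← PySem.List.foldl_prod_mk]
  unfold pvPairs
  rw [pv_foldl_flatMap]
  refine PySem.List.foldl_congr_mem _ _ _ _ ?_
  intro ds i _
  unfold pvBcols pvCellF
  rw [List.foldl_map, ← PySem.List.foldl_if_eq_foldl_filter]

theorem pv_fm_fst {g : Int → List Int} (l : List Int) (hnd : l.Nodup) (x : Int) :
    (((l.flatMap fun i => (g i).map fun j => (i, j)).filter (fun p => p.1 == x)).map (·.2))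
      = if x ∈ l then g x else [] := by
  induction l with
  | nil => simp
  | cons a l ih =>
    rcases List.nodup_cons.1 hnd with ⟨ha, hnd'⟩
    simp only [List.flatMap_cons, List.filter_append, List.map_append, List.filter_map, ih hnd']
    by_cases hax : a = x
    · subst hax
      simp [Function.comp_def, ha]
    · simp [Function.comp_def, hax, Ne.symm hax]

theorem pv_fm_snd {g : Int → List Int} (l : List Int) (h : ∀ i ∈ l, (g i).Nodup) (c : Int) :
    (((l.flatMap fun i => (g i).map fun j => (i, j)).filter (fun p => p.2 == c)).map (·.1))
      = l.filter (fun i => (g i).contains c) := by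
  induction l with
  | nil => simp
  | cons a l ih =>
    have hnd := h a (by simp)
    simp only [List.flatMap_cons, List.filter_append, List.map_append,
      List.filter_map, ih (fun i hi => h i (List.mem_cons_of_mem _ hi)), List.filter_cons]
    by_cases hc : c ∈ g a
    · have : (g a).filter ((fun p => p.2 == c) ∘ fun j => (a, j)) = [c] := by
        simp only [Function.comp_def]
        rw [List.filter_beq, List.count_eq_one_of_mem hnd hc]
        simp
      simp [this, hc]
    · have : (g a).filter ((fun p => p.2 == c) ∘ fun j => (a, j)) = [] := by
        simp only [Function.comp_def]
        rw [List.filter_beq, List.count_eq_zero_of_not_mem hc]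
        simp
      simp [this, hc]

theorem pv_rtc_getD (pic : List (List String)) (m n : Int) (x : Int) :
    (((pvPairs pic m n).foldl (fun d p => d.modify p.1 [] (· ++ [p.2])) PySem.Dict.empty).getD x [])
      = if x ∈ PySem.List.pyRange 0 m 1 then pvBcols pic n x else [] := by
  rw [PySem.Dict.getD_foldl_modify_append]
  simp only [PySem.Dict.getD_empty, List.nil_append]
  exact pv_fm_fst _ (PySem.List.nodup_pyRange_one 0 m) x

theorem pv_ctr_getD (pic : List (List String)) (m n : Int) (c : Int) :
    (((pvPairs pic m n).foldl (fun d p => d.modify p.2 [] (· ++ [p.1])) PySem.Dict.empty).getD c [])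
      = (PySem.List.pyRange 0 m 1).filter (fun i => (pvBcols pic n i).contains c) := by
  rw [show ((pvPairs pic m n).foldl (fun d p => d.modify p.2 [] (· ++ [p.1])) PySem.Dict.empty)
        = (((pvPairs pic m n).map Prod.swap).foldl (fun d p => d.modify p.1 [] (· ++ [p.2])) PySem.Dict.empty) by
      rw [List.foldl_map]; rfl]
  rw [PySem.Dict.getD_foldl_modify_append]
  simp only [PySem.Dict.getD_empty, List.nil_append, List.filter_map, List.map_map]
  have h1 : ((fun p => p.1 == c) ∘ (Prod.swap : Int × Int → Int × Int)) = (fun p => p.2 == c) := by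
    funext p; rfl
  have h2 : ((fun p : Int × Int => p.2) ∘ (Prod.swap : Int × Int → Int × Int)) = (fun p => p.1) := by
    funext p; rfl
  rw [h1, h2]
  exact pv_fm_snd _ (fun i _ => List.Nodup.filter _ (PySem.List.nodup_pyRange_one 0 n)) c

-- A's is_valid loop computes the Chain'-equality of the rows listed in `row`
theorem pv_valid_eq_chain (pic : List (List String)) (row : List Int) (t : Int)
    (hlen : (row.length : Int) = t) :
    ((PySem.List.pyRange 1 t 1).foldl (fun v k =>
      if v then
        if PySem.List.pyGetD pic (PySem.List.pyGetD row (k - 1) 0) []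
             ≠ PySem.List.pyGetD pic (PySem.List.pyGetD row k 0) [] then false
        else v
      else v) true)
    = row.all (fun a => pvRowF pic a == pvRowF pic (row.headD 0)) := by
  subst hlen
  have hb : ∀ (v : Bool) (k : Int),
      (if v = true then
        if PySem.List.pyGetD pic (PySem.List.pyGetD row (k - 1) 0) []
             ≠ PySem.List.pyGetD pic (PySem.List.pyGetD row k 0) [] then false else v
      else v)
      = if (decide (PySem.List.pyGetD pic (PySem.List.pyGetD row (k - 1) 0) []
             ≠ PySem.List.pyGetD pic (PySem.List.pyGetD row k 0) [])) = true then false else v := by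
    intro v k; cases v <;> simp
  rw [PySem.List.foldl_congr_mem _ _ _ _ (fun v k _ => hb v k), PySem.List.foldl_if_false_eq]
  simp only [Bool.true_and]
  rw [Bool.eq_iff_iff]
  simp only [Bool.not_eq_true', List.any_eq_false, List.all_eq_true,
    PySem.List.mem_pyRange_one, decide_eq_true_eq, not_not, beq_iff_eq]
  simp only [pvRowF]
  constructor
  · intro h a ha
    obtain ⟨idx, hidx, rfl⟩ := List.mem_iff_getElem.1 ha
    clear ha
    induction idx with
    | zero =>
      cases row with
      | nil => simp at hidx
      | cons r0 rs => simp
    | succ q ih =>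
      have h1 := h ((q : Int) + 1) ⟨by omega, by push_cast; omega⟩
      rw [PySem.List.pyGetD_eq_getElem row 0 (by omega) (by push_cast; omega),
          PySem.List.pyGetD_eq_getElem row 0 (by omega) (by omega)] at h1
      have e1 : ((q : Int) + 1 - 1).toNat = q := by omega
      have e2 : ((q : Int) + 1).toNat = q + 1 := by omega
      simp only [e1, e2] at h1
      rw [← h1]
      exact ih (by omega)
  · intro h k hk
    rw [PySem.List.pyGetD_eq_getElem row 0 (by omega) (by omega),
        PySem.List.pyGetD_eq_getElem row 0 (by omega) (by omega)]
    rw [h _ (List.getElem_mem _), h _ (List.getElem_mem _)]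

-- sum over a python range as a Finset sum
theorem pv_sum_map_pyRange (N : Nat) (g : Int → Int) :
    ((PySem.List.pyRange 0 (N : Int) 1).map g).sum = ∑ k ∈ Finset.range N, g (k : Int) := by
  induction N with
  | zero => simp [PySem.List.pyRange_one_eq_nil]
  | succ N ih =>
    rw [show ((N + 1 : Nat) : Int) = (N : Int) + 1 by push_cast; ring,
        PySem.List.pyRange_one_succ_right (by positivity), List.map_append, List.sum_append,
        Finset.sum_range_succ, ih]
    simp

theorem pv_countP_pyRange (N : Nat) (p : Int → Bool) :
    (((PySem.List.pyRange 0 (N : Int) 1).countP p : Int)) = ∑ k ∈ Finset.range N, (if p (k : Int) then (1 : Int) else 0) := by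
  rw [← pv_sum_map_pyRange N (fun k => if p k then (1 : Int) else 0),
      PySem.List.sum_map_ite_one_zero]

-- count of 'B' in the first N cells of a row, as the length of the filtered column list
theorem pv_countB (r : List String) (N : Nat) (hN : N ≤ r.length) :
    ((PySem.List.pyRange 0 (N : Int) 1).filter (fun j => PySem.List.pyGetD r j "" == "B")).length
      = (r.take N).count "B" := by
  have hmap : (PySem.List.pyRange 0 (N : Int) 1).map (fun j => PySem.List.pyGetD r j "") = r.take N := by
    induction N with
    | zero => simp [PySem.List.pyRange_one_eq_nil]
    | succ M ih =>
      have hM : M ≤ r.length := Nat.le_of_succ_le hN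
      rw [show ((M + 1 : Nat) : Int) = (M : Int) + 1 by push_cast; ring,
          PySem.List.pyRange_one_succ_right (by positivity), List.map_append,
          ih hM, List.take_add_one]
      simp [PySem.List.pyGetD_natCast, List.getD_eq_getElem?_getD,
            List.getElem?_eq_getElem (show M < r.length by omega)]
  rw [← List.countP_eq_length_filter, List.count, ← hmap, List.countP_map]
  rfl

-- the inner per-row loop of A counts the valid columns among bc
theorem pv_inner (pic : List (List String)) (t : Int) (D : PySem.Dict Int (List Int))
    (bc : List Int) (hD : ∀ c ∈ bc, D.getD c [] = pvBrows pic c) (count : Int) :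
    (PySem.List.pyRange 0 (bc.length : Int) 1).foldl (fun count j =>
      if ((D.getD (PySem.List.pyGetD bc j 0) []).length : Int) ≠ t then count
      else
        if (PySem.List.pyRange 1 t 1).foldl (fun v k =>
            if v then
              if PySem.List.pyGetD pic (PySem.List.pyGetD (D.getD (PySem.List.pyGetD bc j 0) []) (k - 1) 0) []
                   ≠ PySem.List.pyGetD pic (PySem.List.pyGetD (D.getD (PySem.List.pyGetD bc j 0) []) k 0) [] then false
              else v
            else v) true
        then count + 1 else count) count
    = count + (bc.countP (pvColOK pic t) : Int) := by
  rw [PySem.List.foldl_pyRange_zero_pyGetD' bc 0 (fun count c =>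
      if ((D.getD c []).length : Int) ≠ t then count
      else
        if (PySem.List.pyRange 1 t 1).foldl (fun v k =>
            if v then
              if PySem.List.pyGetD pic (PySem.List.pyGetD (D.getD c []) (k - 1) 0) []
                   ≠ PySem.List.pyGetD pic (PySem.List.pyGetD (D.getD c []) k 0) [] then false
              else v
            else v) true
        then count + 1 else count) count]
  rw [PySem.List.foldl_congr_mem _ _ (fun count c => if pvColOK pic t c then count + 1 else count) _ ?_]
  · rw [PySem.List.foldl_if_add_one]
  · intro count c hc
    rw [hD c hc]
    by_cases hbl : ((pvBrows pic c).length : Int) = t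
    · rw [if_neg (by omega), pv_valid_eq_chain pic (pvBrows pic c) t hbl]
      unfold pvColOK
      beta_reduce
      rw [show (((pvBrows pic c).length : Int) == t) = true from beq_iff_eq.mpr hbl]
      rw [Bool.true_and]
    · rw [if_pos hbl]
      unfold pvColOK
      beta_reduce
      rw [show (((pvBrows pic c).length : Int) == t) = false by simp [hbl]]
      rw [Bool.false_and, if_neg (by simp)]

-- A as a row-major double sum
theorem pv_A_eq (pic : List (List String)) (t : Int) :
    findBlackPixel pic t
      = ∑ i ∈ Finset.range pic.length,
          (if ((pvBcols pic ((PySem.List.pyGetD pic 0 []).length : Int) (i : Int)).length : Int) = t then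
            ((pvBcols pic ((PySem.List.pyGetD pic 0 []).length : Int) (i : Int)).countP (pvColOK pic t) : Int)
          else 0) := by
  have hmain : findBlackPixel pic t
      = (PySem.List.pyRange 0 (pic.length : Int) 1).foldl
          (fun count i => count +
            (if ((pvBcols pic ((PySem.List.pyGetD pic 0 []).length : Int) i).length : Int) = t then
              ((pvBcols pic ((PySem.List.pyGetD pic 0 []).length : Int) i).countP (pvColOK pic t) : Int)
            else 0)) 0 := by
    simp only [findBlackPixel, pv_build_eq]
    apply PySem.List.foldl_congr_mem
    intro count i hi
    have hm := PySem.List.mem_pyRange_one.1 hi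
    have hget : ((pvPairs pic (pic.length : Int) ((PySem.List.pyGetD pic 0 []).length : Int)).foldl
        (fun d p => d.modify p.1 [] (· ++ [p.2])) PySem.Dict.empty).getD i []
        = pvBcols pic ((PySem.List.pyGetD pic 0 []).length : Int) i := by
      rw [pv_rtc_getD, if_pos hi]
    by_cases hcont : ((pvPairs pic (pic.length : Int) ((PySem.List.pyGetD pic 0 []).length : Int)).foldl
        (fun d p => d.modify p.1 [] (· ++ [p.2])) PySem.Dict.empty).contains i
    · rw [hget]
      by_cases hlen : ((pvBcols pic ((PySem.List.pyGetD pic 0 []).length : Int) i).length : Int) = t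
      · rw [if_neg (by simp [hcont, hlen]), if_pos hlen]
        exact pv_inner pic t _ _ (fun c hc => by
          rw [pv_ctr_getD]
          unfold pvBrows
          refine List.filter_congr ?_
          intro i' _
          have hcmem := (List.mem_filter.1 hc)
          have hcb := PySem.List.mem_pyRange_one.1 hcmem.1
          rw [Bool.eq_iff_iff]
          unfold pvBcols
          simp [List.mem_filter, PySem.List.mem_pyRange_one, hcb.1, hcb.2]) count
      · rw [if_pos (by simp [hcont, hlen]), if_neg hlen, add_zero]
    · have hnil : pvBcols pic ((PySem.List.pyGetD pic 0 []).length : Int) i = [] := by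
        rw [← hget, PySem.Dict.getD_of_not_contains _ _ (by simpa using hcont)]
      rw [if_pos (Or.inl hcont), hnil]
      split_ifs <;> simp
  rw [hmain, PySem.List.foldl_add, zero_add, pv_sum_map_pyRange]

-- B as a column-major sum
theorem pv_B_eq (pic : List (List String)) (t : Int) :
    findBlackPixel_alt pic t
      = ∑ c ∈ Finset.range (PySem.List.pyGetD pic 0 []).length,
          (if pvBrows pic (c : Int) ≠ [] ∧ ((pvBrows pic (c : Int)).length : Int) = t
              ∧ (pvBrows pic (c : Int)).all (fun i => PySem.List.pyGetD pic i [] == PySem.List.pyGetD pic ((pvBrows pic (c : Int)).headD 0) [])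
              ∧ (((PySem.List.pyGetD pic ((pvBrows pic (c : Int)).headD 0) []).take (PySem.List.pyGetD pic 0 []).length).count "B" : Int) = t
          then t else 0) := by
  simp only [findBlackPixel_alt]
  rw [PySem.List.foldl_congr_mem _ _ (fun total j => total +
      (if pvBrows pic j ≠ [] ∧ ((pvBrows pic j).length : Int) = t
          ∧ (pvBrows pic j).all (fun i => PySem.List.pyGetD pic i [] == PySem.List.pyGetD pic ((pvBrows pic j).headD 0) [])
          ∧ (((PySem.List.pyGetD pic ((pvBrows pic j).headD 0) []).take (PySem.List.pyGetD pic 0 []).length).count "B" : Int) = t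
        then t else 0)) _ ?_]
  · rw [PySem.List.foldl_add, zero_add, pv_sum_map_pyRange]
  · intro total j _
    simp only [pvBrows, pvCellF]
    split_ifs with h
    · rfl
    · omega

-- the combinatorial bridge: row-major and column-major counts agree
theorem pv_bridge (pic : List (List String)) (t : Int)
    (hPre : ∀ r ∈ pic, (pic.headD []).length ≤ r.length) :
    (∑ i ∈ Finset.range pic.length,
      (if ((pvBcols pic ((PySem.List.pyGetD pic 0 []).length : Int) (i : Int)).length : Int) = t then
        ((pvBcols pic ((PySem.List.pyGetD pic 0 []).length : Int) (i : Int)).countP (pvColOK pic t) : Int)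
      else 0))
    = ∑ c ∈ Finset.range (PySem.List.pyGetD pic 0 []).length,
        (if pvBrows pic (c : Int) ≠ [] ∧ ((pvBrows pic (c : Int)).length : Int) = t
            ∧ (pvBrows pic (c : Int)).all (fun i => PySem.List.pyGetD pic i [] == PySem.List.pyGetD pic ((pvBrows pic (c : Int)).headD 0) [])
            ∧ (((PySem.List.pyGetD pic ((pvBrows pic (c : Int)).headD 0) []).take (PySem.List.pyGetD pic 0 []).length).count "B" : Int) = t
        then t else 0) := by
  have hstep1 : ∀ i : Nat,
      (if ((pvBcols pic ((PySem.List.pyGetD pic 0 []).length : Int) (i : Int)).length : Int) = t then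
        ((pvBcols pic ((PySem.List.pyGetD pic 0 []).length : Int) (i : Int)).countP (pvColOK pic t) : Int)
      else 0)
      = ∑ c ∈ Finset.range (PySem.List.pyGetD pic 0 []).length,
          (if pvCellF pic (i : Int) (c : Int) = true
              ∧ ((pvBcols pic ((PySem.List.pyGetD pic 0 []).length : Int) (i : Int)).length : Int) = t
              ∧ pvColOK pic t (c : Int) = true then (1 : Int) else 0) := by
    intro i
    by_cases hl : ((pvBcols pic ((PySem.List.pyGetD pic 0 []).length : Int) (i : Int)).length : Int) = t
    · rw [if_pos hl]
      conv_lhs => rw [pvBcols]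
      rw [List.countP_filter, pv_countP_pyRange]
      refine Finset.sum_congr rfl ?_
      intro c _
      by_cases h1 : pvColOK pic t (c : Int) = true <;>
        by_cases h2 : pvCellF pic (i : Int) (c : Int) = true <;>
          simp [h1, h2, hl]
    · rw [if_neg hl]
      symm
      refine Finset.sum_eq_zero ?_
      intro c _
      simp [hl]
  rw [Finset.sum_congr rfl (fun i _ => hstep1 i), Finset.sum_comm]
  refine Finset.sum_congr rfl ?_
  intro c hc
  by_cases hok : pvColOK pic t (c : Int) = true
  · have hok' := hok
    unfold pvColOK at hok'
    rw [Bool.and_eq_true] at hok'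
    have hlenr : ((pvBrows pic (c : Int)).length : Int) = t := beq_iff_eq.1 hok'.1
    have hall := hok'.2
    by_cases hne : pvBrows pic (c : Int) = []
    · have hcellz : ∀ i ∈ Finset.range pic.length, pvCellF pic (i : Int) (c : Int) = false := by
        intro i hiN
        by_contra hcell
        rw [Bool.not_eq_false] at hcell
        have : (i : Int) ∈ pvBrows pic (c : Int) := by
          unfold pvBrows
          refine List.mem_filter.2 ⟨PySem.List.mem_pyRange_one.2 ⟨by positivity, ?_⟩, hcell⟩
          exact_mod_cast Finset.mem_range.1 hiN
        rw [hne] at this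
        simp at this
      rw [Finset.sum_eq_zero (fun i hiN => by simp [hcellz i hiN]), if_neg (by
        rintro ⟨h1, -, -, -⟩
        exact h1 hne)]
    · -- nonempty column
      have hhead : (pvBrows pic (c : Int)).headD 0 ∈ pvBrows pic (c : Int) := by
        cases hrows : pvBrows pic (c : Int) with
        | nil => exact absurd hrows hne
        | cons a l => simp
      have hheadf := List.mem_filter.1 hhead
      have hheadb := PySem.List.mem_pyRange_one.1 hheadf.1
      have hrowseq : ∀ a ∈ pvBrows pic (c : Int),
          PySem.List.pyGetD pic a [] = PySem.List.pyGetD pic ((pvBrows pic (c : Int)).headD 0) [] := by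
        intro a ha
        have := List.all_eq_true.1 hall a ha
        exact beq_iff_eq.1 this
      have hbceq : ∀ a ∈ pvBrows pic (c : Int),
          pvBcols pic ((PySem.List.pyGetD pic 0 []).length : Int) a
            = pvBcols pic ((PySem.List.pyGetD pic 0 []).length : Int) ((pvBrows pic (c : Int)).headD 0) := by
        intro a ha
        unfold pvBcols
        refine List.filter_congr ?_
        intro j _
        unfold pvCellF
        rw [hrowseq a ha]
      have hcount : (((PySem.List.pyGetD pic ((pvBrows pic (c : Int)).headD 0) []).take (PySem.List.pyGetD pic 0 []).length).count "B" : Int)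
          = ((pvBcols pic ((PySem.List.pyGetD pic 0 []).length : Int) ((pvBrows pic (c : Int)).headD 0)).length : Int) := by
        have hmem : PySem.List.pyGetD pic ((pvBrows pic (c : Int)).headD 0) [] ∈ pic := by
          rw [PySem.List.pyGetD_eq_getElem pic [] hheadb.1 hheadb.2]
          exact List.getElem_mem _
        have hlenK : (PySem.List.pyGetD pic 0 []).length ≤ (PySem.List.pyGetD pic ((pvBrows pic (c : Int)).headD 0) []).length := by
          rw [pv_row0]
          exact hPre _ hmem
        unfold pvBcols pvCellF
        rw [← pv_countB _ _ hlenK]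
      have hsum : (∑ i ∈ Finset.range pic.length,
          (if pvCellF pic (i : Int) (c : Int) = true
              ∧ ((pvBcols pic ((PySem.List.pyGetD pic 0 []).length : Int) (i : Int)).length : Int) = t
              ∧ pvColOK pic t (c : Int) = true then (1 : Int) else 0))
          = (if ((pvBcols pic ((PySem.List.pyGetD pic 0 []).length : Int) ((pvBrows pic (c : Int)).headD 0)).length : Int) = t then t else 0) := by
        by_cases hhl : ((pvBcols pic ((PySem.List.pyGetD pic 0 []).length : Int) ((pvBrows pic (c : Int)).headD 0)).length : Int) = t
        · rw [if_pos hhl]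
          have hsummand : ∀ i ∈ Finset.range pic.length,
              (if pvCellF pic (i : Int) (c : Int) = true
                  ∧ ((pvBcols pic ((PySem.List.pyGetD pic 0 []).length : Int) (i : Int)).length : Int) = t
                  ∧ pvColOK pic t (c : Int) = true then (1 : Int) else 0)
              = if pvCellF pic (i : Int) (c : Int) then (1 : Int) else 0 := by
            intro i hiN
            by_cases hcell : pvCellF pic (i : Int) (c : Int) = true
            · have hmemrows : (i : Int) ∈ pvBrows pic (c : Int) := by
                unfold pvBrows
                refine List.mem_filter.2 ⟨PySem.List.mem_pyRange_one.2 ⟨by positivity, ?_⟩, hcell⟩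
                exact_mod_cast Finset.mem_range.1 hiN
              rw [if_pos ⟨hcell, by rw [hbceq _ hmemrows]; exact hhl, hok⟩, if_pos hcell]
            · rw [if_neg (by tauto), if_neg hcell]
          rw [Finset.sum_congr rfl hsummand,
              ← pv_countP_pyRange pic.length (fun i => pvCellF pic i (c : Int))]
          have : (pvBrows pic (c : Int)).length
              = (PySem.List.pyRange 0 (pic.length : Int) 1).countP (fun i => pvCellF pic i (c : Int)) := by
            unfold pvBrows
            rw [List.countP_eq_length_filter]
          rw [← hlenr, this]
        · rw [if_neg hhl]
          refine Finset.sum_eq_zero ?_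
          intro i _
          by_cases hcell : pvCellF pic (i : Int) (c : Int) = true
          · have hmemrows : (i : Int) ∈ pvBrows pic (c : Int) := by
              unfold pvBrows
              refine List.mem_filter.2 ⟨PySem.List.mem_pyRange_one.2 ⟨by positivity, ?_⟩, hcell⟩
              exact_mod_cast Finset.mem_range.1 ‹i ∈ Finset.range pic.length›
            rw [if_neg (by rw [hbceq _ hmemrows] at *; tauto)]
          · rw [if_neg (by tauto)]
      rw [hsum]
      by_cases hfin : ((pvBcols pic ((PySem.List.pyGetD pic 0 []).length : Int) ((pvBrows pic (c : Int)).headD 0)).length : Int) = t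
      · rw [if_pos hfin, if_pos ⟨hne, hlenr, hall, by rw [hcount]; exact hfin⟩]
      · rw [if_neg hfin, if_neg (fun hcond => hfin (by rw [← hcount]; exact hcond.2.2.2))]
  · rw [Finset.sum_eq_zero (fun i _ => by simp [hok]), if_neg (by
      rintro ⟨hne, hlenr, hall, -⟩
      exact hok (by
        unfold pvColOK
        rw [Bool.and_eq_true]
        exact ⟨beq_iff_eq.2 hlenr, hall⟩))]

-- ===== VERDICT (by name: the statement is the Claim_ definition above) =====
theorem findBlackPixel_spec : Claim_equal_findBlackPixel := by
  intro pic t _hDom hPre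
  unfold Spec_findBlackPixel
  rw [pv_A_eq, pv_B_eq, pv_bridge pic t hPre.2]
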